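-- pv_equiv track=rewrite | github.com/jsaintyv/Fcsc2025WriteUp | bergere/crypto_accelerator.py | NegInvertModuloPower2
-- ===== SOURCE A (Python) =====
-- def NegInvertModuloPower2(a,n):
--     if a&1==0:
--         return False
--     a &=((1<<n)-1)
--     res = 1
--     i = 1
--     while i<n :
--         res = res*(2+a*res)
--         i<<=1
--     return res&((1<<n)-1)
-- ===== SOURCE B (Python) =====
-- def NegInvertModuloPower2(a, n):
--     if a & 1 == 0:
--         return False
--     m = 1 << n
--     return -pow(a, -1, m) % m
-- ===== Notes on version B (the rewrite author's own statement) =====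
-- stated objective: idiomatic
-- what changed: Replaces the hand-written Newton/Hensel doubling loop on an unreduced iterate by the standard-library modular inverse: -pow(a, -1, 1<<n) % (1<<n).
-- outside the precondition, e.g. on NegInvertModuloPower2(2, 3): A returns False, B returns False
import Mathlib
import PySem

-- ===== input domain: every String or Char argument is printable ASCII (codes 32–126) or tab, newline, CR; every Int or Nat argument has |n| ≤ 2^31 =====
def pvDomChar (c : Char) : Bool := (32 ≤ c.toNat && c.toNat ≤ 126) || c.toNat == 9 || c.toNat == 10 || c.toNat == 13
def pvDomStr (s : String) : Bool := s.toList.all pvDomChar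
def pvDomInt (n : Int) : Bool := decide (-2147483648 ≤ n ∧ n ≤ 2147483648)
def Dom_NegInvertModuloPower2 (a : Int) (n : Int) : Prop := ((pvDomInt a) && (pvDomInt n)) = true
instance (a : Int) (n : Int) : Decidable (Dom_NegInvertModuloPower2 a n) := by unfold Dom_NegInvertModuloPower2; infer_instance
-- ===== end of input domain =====

-- B replaces A's hand-written Newton/Hensel doubling loop by the standard-library modular
-- inverse (pow(a,-1,1<<n), ported as Mathlib's extended gcd); objective: idiomatic.

-- ===== PORT A =====
-- While loop ported with fuel n.toNat (i doubles from 1, so ≤ log2 n < n.toNat iterations).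
-- For n ≥ 0, Python's `a & ((1<<n)-1)` is exactly `a % 2^n` (Lean Int `%` = emod = Python mod
-- for a positive divisor), and `a & 1 == 0` is `a % 2 == 0`.
def pvLoopA (fuel : Nat) (a n res i : Int) : Int :=
  match fuel with
  | 0 => res
  | f + 1 => if i < n then pvLoopA f a n (res * (2 + a * res)) (i * 2) else res

def NegInvertModuloPower2 (a : Int) (n : Int) : Option Int :=
  if a % 2 == 0 then none
  else
    let m : Int := 2 ^ n.toNat
    let a' := a % m
    some (pvLoopA n.toNat a' n 1 1 % m)

-- ===== PORT B =====
-- Source B's `pow(a, -1, m)` (a library call) is ported as the extended-gcd modular inverse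
-- Nat.gcdA: pow(a,-1,m) is the inverse of a mod m in [0,m), and Nat.gcdA (a % m).toNat m.toNat
-- is congruent to it mod m, so `-gcdA % m` equals Python's `-pow(a,-1,m) % m` exactly.
def NegInvertModuloPower2_alt (a : Int) (n : Int) : Option Int :=
  if a % 2 == 0 then none
  else
    let m : Int := 2 ^ n.toNat
    some (-(Nat.gcdA (a % m).toNat m.toNat) % m)

-- ===== PRECONDITION & SPEC =====
-- Pre_ excludes even a, where A returns the bool False (not an int value), and n < 0,
-- where Python's `1 << n` raises ValueError.
def Pre_NegInvertModuloPower2 (a : Int) (n : Int) : Prop := a % 2 = 1 ∧ 0 ≤ n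
instance (a : Int) (n : Int) : Decidable (Pre_NegInvertModuloPower2 a n) := by
  unfold Pre_NegInvertModuloPower2; infer_instance

def pvWitness_NegInvertModuloPower2 : Int × Int := (3, 4)

def Spec_NegInvertModuloPower2 (a : Int) (n : Int) (out : Option Int) : Prop := out = NegInvertModuloPower2_alt a n
instance (a : Int) (n : Int) (out : Option Int) : Decidable (Spec_NegInvertModuloPower2 a n out) := by unfold Spec_NegInvertModuloPower2; infer_instance

-- ===== CLAIM (what is proved, stated in full; the proofs are below) =====
def Claim_equal_NegInvertModuloPower2 : Prop := ∀ (a : Int) (n : Int), Dom_NegInvertModuloPower2 a n → Pre_NegInvertModuloPower2 a n → Spec_NegInvertModuloPower2 a n (NegInvertModuloPower2 a n)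

-- ===== LEMMAS AND PROOFS =====

-- An odd number can be cancelled from a divisibility by a power of two.
lemma pow2_dvd_of_odd_mul (a : Int) (ha : a % 2 = 1) :
    ∀ (N : Nat) (d : Int), (2 : Int) ^ N ∣ a * d → (2 : Int) ^ N ∣ d := by
  intro N
  induction N with
  | zero => intro d _; simp
  | succ N ih =>
    intro d h
    have h2 : (2 : Int) ∣ a * d := dvd_trans (dvd_pow_self 2 (Nat.succ_ne_zero N)) h
    have hmod : (a * d) % 2 = d % 2 := by
      have h1 := Int.mul_emod a d 2
      have h3 := Int.emod_emod_of_dvd d (dvd_refl (2 : Int))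
      rw [ha] at h1; omega
    have hd2 : (2 : Int) ∣ d := by omega
    obtain ⟨e, he⟩ := hd2
    subst he
    have h4 : (2 : Int) ^ N ∣ a * e := by
      have : (2 : Int) ^ (N + 1) = 2 ^ N * 2 := by ring
      rw [this] at h
      have h' : 2 ^ N * 2 ∣ 2 * (a * e) := by
        have : a * (2 * e) = 2 * (a * e) := by ring
        rwa [this] at h
      rcases h' with ⟨c, hc⟩
      exact ⟨c, by linarith⟩
    have hfin := mul_dvd_mul_left 2 (ih e h4)
    rwa [show (2:Int)^(N+1) = 2*2^N by ring]

-- Invariant of A's Newton loop: correctness mod 2^i is preserved (and squared each step).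
lemma loopA_inv (a n : Int) :
    ∀ (f : Nat) (res i : Int), 1 ≤ i → n ≤ i * 2 ^ f →
      ((2 : Int) ^ i.toNat ∣ a * res + 1) →
      (2 : Int) ^ n.toNat ∣ a * pvLoopA f a n res i + 1 := by
  intro f
  induction f with
  | zero =>
    intro res i hi hle hd
    simp only [pvLoopA]
    have hN : n.toNat ≤ i.toNat := by simp at hle; omega
    exact dvd_trans (pow_dvd_pow 2 hN) hd
  | succ f ih =>
    intro res i hi hle hd
    simp only [pvLoopA]
    split
    · next h =>
      apply ih
      · omega
      · have : i * 2 ^ (f + 1) = i * 2 * 2 ^ f := by ring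
        rw [this] at hle; exact hle
      · have ht : (i * 2).toNat = 2 * i.toNat := by omega
        rw [ht]
        have hsq : a * (res * (2 + a * res)) + 1 = (a * res + 1) ^ 2 := by ring
        rw [hsq, mul_comm 2 i.toNat, pow_mul]
        exact pow_dvd_pow_of_dvd hd 2
    · next h =>
      have hN : n.toNat ≤ i.toNat := by omega
      exact dvd_trans (pow_dvd_pow 2 hN) hd

-- The extended-gcd coefficient is a (negated) inverse: for odd a', m = 2^N divides a'*(-g)+1.
lemma gcdA_neg_inv (a' : Int) (N : Nat) (ha : a' % 2 = 1) (ha0 : 0 ≤ a') :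
    (2 : Int) ^ N ∣ a' * (-(Nat.gcdA a'.toNat (2 ^ N : Nat))) + 1 := by
  have hodd : Odd a'.toNat := by
    rw [Nat.odd_iff]; omega
  have hcop : Nat.Coprime a'.toNat (2 ^ N) :=
    Nat.Coprime.pow_right N hodd.coprime_two_right
  have hab := Nat.gcd_eq_gcd_ab a'.toNat (2 ^ N)
  rw [hcop] at hab
  have hcast : ((a'.toNat : Int)) = a' := by omega
  have hcast2 : (((2 : Nat) ^ N : Nat) : Int) = (2 : Int) ^ N := by push_cast; ring
  rw [hcast, hcast2] at hab
  refine ⟨Nat.gcdB a'.toNat (2 ^ N), ?_⟩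
  have : (1 : Int) = a' * Nat.gcdA a'.toNat (2 ^ N) + 2 ^ N * Nat.gcdB a'.toNat (2 ^ N) := by
    exact_mod_cast hab
  linarith

-- Divisibility transfers from r to r % m.
lemma dvd_emod_transfer (m a r : Int) (h : m ∣ a * r + 1) : m ∣ a * (r % m) + 1 := by
  have hr : r % m = r - m * (r / m) := by rw [Int.emod_def]
  have : a * (r % m) + 1 = (a * r + 1) - m * (a * (r / m)) := by rw [hr]; ring
  rw [this]
  exact dvd_sub h (Dvd.intro _ rfl)

-- Uniqueness of the negative inverse mod 2^N among residues in [0, 2^N).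
lemma neg_inv_unique (a : Int) (N : Nat) (ha : a % 2 = 1) (r s : Int)
    (hr1 : (2 : Int) ^ N ∣ a * r + 1) (hs1 : (2 : Int) ^ N ∣ a * s + 1)
    (hr : 0 ≤ r) (hr2 : r < 2 ^ N) (hs : 0 ≤ s) (hs2 : s < 2 ^ N) : r = s := by
  have hdvd : (2 : Int) ^ N ∣ a * (r - s) := by
    have : a * (r - s) = (a * r + 1) - (a * s + 1) := by ring
    rw [this]; exact dvd_sub hr1 hs1
  have hdvd2 : (2 : Int) ^ N ∣ r - s := pow2_dvd_of_odd_mul a ha N _ hdvd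
  obtain ⟨c, hc⟩ := hdvd2
  have hpow : (0 : Int) < 2 ^ N := by positivity
  have hc0 : c = 0 := by
    rcases lt_trichotomy c 0 with h | h | h
    · exfalso; nlinarith
    · exact h
    · exfalso; nlinarith
  rw [hc0] at hc; omega

-- ===== VERDICT (by name: the statement is the Claim_ definition above) =====
theorem NegInvertModuloPower2_spec : Claim_equal_NegInvertModuloPower2 := by
  intro a n _ hpre
  obtain ⟨ha, hn⟩ := hpre
  unfold Spec_NegInvertModuloPower2 NegInvertModuloPower2 NegInvertModuloPower2_alt
  rw [if_neg (by simp [ha]), if_neg (by simp [ha])]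
  by_cases hn0 : n = 0
  · subst hn0; simp
  · have hn1 : 1 ≤ n := by omega
    set m : Int := 2 ^ n.toNat with hm
    have hmpos : (0 : Int) < m := by positivity
    have ha0 : 0 ≤ a % m := Int.emod_nonneg _ (by omega)
    have ha' : a % m % 2 = 1 := by
      have h2m : (2 : Int) ∣ m := dvd_pow_self 2 (by omega)
      rw [Int.emod_emod_of_dvd a h2m, ha]
    have hbase : (2 : Int) ^ (1 : Int).toNat ∣ (a % m) * 1 + 1 := by
      have h21 : (2 : Int) ^ (1 : Int).toNat = 2 := by norm_num
      rw [h21, mul_one]; omega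
    have hA : m ∣ (a % m) * pvLoopA n.toNat (a % m) n 1 1 + 1 := by
      apply loopA_inv (a % m) n n.toNat 1 1 le_rfl _ hbase
      have h1 : (n.toNat : Int) < 2 ^ n.toNat := by
        exact_mod_cast Nat.lt_two_pow_self
      omega
    have hmt : m.toNat = 2 ^ n.toNat := by
      rw [hm]; rw [show ((2:Int) ^ n.toNat) = ((2 ^ n.toNat : Nat) : Int) by push_cast; ring]; exact Int.toNat_natCast _
    have hB : m ∣ (a % m) * (-(Nat.gcdA (a % m).toNat m.toNat)) + 1 := by
      rw [hmt, hm]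
      exact gcdA_neg_inv (a % m) n.toNat ha' ha0
    show some (pvLoopA n.toNat (a % m) n 1 1 % m) =
      some (-(Nat.gcdA (a % m).toNat m.toNat) % m)
    congr 1
    apply neg_inv_unique (a % m) n.toNat ha'
    · exact dvd_emod_transfer m _ _ hA
    · exact dvd_emod_transfer m _ _ hB
    · exact Int.emod_nonneg _ (by omega)
    · exact Int.emod_lt_of_pos _ hmpos
    · exact Int.emod_nonneg _ (by omega)
    · exact Int.emod_lt_of_pos _ hmpos
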